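-- pv_equiv track=rewrite | github.com/goodhonestgood/------- | 6549.py | func
-- ===== SOURCE A (Python) =====
-- def func(recs):
--     t = len(recs)*1
--     t = max(t, recs[0])
--     counts = 1
--     for i in range(1,len(recs)):
--         if recs[i-1] <= recs[i]:
--             counts+=1
--         else:
--             counts = 0
--         t = max([c * recs[i + 1 - c] for c in range(1,counts+1)]+[recs[i],t])
--     return t
-- ===== SOURCE B (Python) =====
-- def func(recs):
--     # O(n): reach[j] = length of the longest non-decreasing segment starting at j,
--     # computed right-to-left; an index anchors rectangles only when it extends a
--     # non-decreasing step from its predecessor (or is index 0), and its widest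
--     # rectangle spans to the end of its run; floor the answer by len(recs) and
--     # by the largest single element.
--     n = len(recs)
--     reach = [1] * n
--     for j in range(n - 2, -1, -1):
--         if recs[j] <= recs[j + 1]:
--             reach[j] = reach[j + 1] + 1
--     best = max(n, max(recs))
--     for j in range(n):
--         if j == 0 or recs[j - 1] <= recs[j]:
--             best = max(best, reach[j] * recs[j])
--     return best
-- ===== Notes on version B (the rewrite author's own statement) =====
-- stated objective: faster
-- what changed: B replaces A's per-index rescan of every rectangle width in the current run by a right-to-left run-length DP (reach[j]) plus one pass taking a single widest candidate per anchoring index; Pre_ excludes only the empty list, on which A raises IndexError (B raises ValueError there too).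
import Mathlib
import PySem

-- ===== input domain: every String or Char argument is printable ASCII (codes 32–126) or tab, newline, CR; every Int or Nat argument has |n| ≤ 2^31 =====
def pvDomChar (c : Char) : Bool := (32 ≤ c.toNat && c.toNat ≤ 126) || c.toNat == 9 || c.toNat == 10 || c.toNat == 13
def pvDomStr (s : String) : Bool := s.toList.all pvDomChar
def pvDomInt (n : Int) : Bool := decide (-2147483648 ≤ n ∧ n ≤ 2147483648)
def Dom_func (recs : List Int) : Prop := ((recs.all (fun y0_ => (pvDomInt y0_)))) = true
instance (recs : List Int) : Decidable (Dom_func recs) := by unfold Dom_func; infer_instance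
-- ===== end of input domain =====

-- B replaces A's per-index rescan of every width in the current run (O(n^2)) by a
-- right-to-left run-length DP plus a single widest candidate per anchor (O(n)).

-- ===== PORT A =====
-- Python max of a non-empty list (the [] case is unreachable in A).
def pvMax : List Int → Int
  | [] => 0
  | x :: xs => xs.foldl max x

-- the loop 'for i in range(1, len(recs))' with state (t, counts)
def funcAux (recs : List Int) (i : Nat) (t counts : Int) : Int :=
  if _h : i < recs.length then
    let counts' := if PySem.List.pyGetD recs ((i : Int) - 1) 0 ≤ PySem.List.pyGetD recs (i : Int) 0
      then counts + 1 else 0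
    let t' := pvMax (((PySem.List.pyRange 1 (counts' + 1) 1).map
        (fun c => c * PySem.List.pyGetD recs ((i : Int) + 1 - c) 0)) ++
        [PySem.List.pyGetD recs (i : Int) 0, t])
    funcAux recs (i + 1) t' counts'
  else t
termination_by recs.length - i

def func (recs : List Int) : Int :=
  funcAux recs 1 (max ((recs.length : Int) * 1) (PySem.List.pyGetD recs 0 0)) 1

-- ===== PORT B =====
-- Python max(recs) for non-empty recs (the [] case is unreachable in B).
def bMax : List Int → Int
  | [] => 0
  | x :: xs => xs.foldl max x

-- the right-to-left DP 'for j in range(n-2, -1, -1)' building the reach array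
def reachList : List Int → List Int
  | [] => []
  | [_] => [1]
  | x :: y :: rest =>
    let r := reachList (y :: rest)
    (if x ≤ y then r.headD 1 + 1 else 1) :: r

-- the loop 'for j in range(n)' with accumulator best
def func_alt (recs : List Int) : Int :=
  let reach := reachList recs
  (List.range recs.length).foldl
    (fun best j =>
      if j = 0 ∨ recs.getD (j - 1) 0 ≤ recs.getD j 0 then
        max best (reach.getD j 1 * recs.getD j 0)
      else best)
    (max ((recs.length : Int)) (bMax recs))

-- ===== PRECONDITION & SPEC =====
-- A raises IndexError on the empty list (recs[0]); Pre_ excludes only that.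
def Pre_func (recs : List Int) : Prop := recs ≠ []
instance (recs : List Int) : Decidable (Pre_func recs) := by unfold Pre_func; infer_instance
def pvWitness_func : List Int := [1, 2]

def Spec_func (recs : List Int) (out : Int) : Prop := out = func_alt recs
instance (recs : List Int) (out : Int) : Decidable (Spec_func recs out) := by unfold Spec_func; infer_instance

-- ===== CLAIM (what is proved, stated in full; the proofs are below) =====
def Claim_equal_func : Prop := ∀ (recs : List Int), Dom_func recs → Pre_func recs → Spec_func recs (func recs)

-- ===== LEMMAS AND PROOFS =====

-- generic foldl-max facts
theorem le_foldl_max (l : List Int) (b : Int) : b ≤ l.foldl max b := by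
  induction l generalizing b with
  | nil => exact le_refl _
  | cons x xs ih => exact le_trans (le_max_left b x) (ih (max b x))

theorem foldl_max_le (l : List Int) (b c : Int) (hb : b ≤ c) (hl : ∀ x ∈ l, x ≤ c) :
    l.foldl max b ≤ c := by
  induction l generalizing b with
  | nil => exact hb
  | cons x xs ih =>
    exact ih (max b x) (max_le hb (hl x (by simp))) (fun y hy => hl y (by simp [hy]))

theorem mem_le_foldl_max (l : List Int) (b x : Int) (hx : x ∈ l) : x ≤ l.foldl max b := by
  induction l generalizing b with
  | nil => cases hx
  | cons y ys ih =>
    rcases List.mem_cons.mp hx with rfl | h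
    · exact le_trans (le_max_right b x) (le_foldl_max ys (max b x))
    · exact ih (max b y) h

theorem foldl_max_max (l : List Int) (a b : Int) :
    l.foldl max (max a b) = max a (l.foldl max b) := by
  induction l generalizing b with
  | nil => rfl
  | cons x xs ih => simp only [List.foldl, max_assoc, ih]

theorem pvMax_append_two (l : List Int) (a b : Int) :
    pvMax (l ++ [a, b]) = l.foldl max (max a b) := by
  cases l with
  | nil => simp [pvMax]
  | cons x xs =>
    simp only [List.cons_append, pvMax, List.foldl_append, List.foldl]
    rw [foldl_max_max xs (max a b) x]
    omega

theorem pyGetD_int_eq (recs : List Int) (a : Int) (j : Nat) (h : a = (j : Int)) :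
    PySem.List.pyGetD recs a 0 = recs.getD j 0 := by
  subst h; exact PySem.List.pyGetD_natCast recs j 0

-- ---- reach facts ----
-- R recs j is what Source B stores in reach[j]
def R (recs : List Int) (j : Nat) : Int := (reachList recs).getD j 1

theorem reach_tail (x : Int) (rest : List Int) (j : Nat) :
    R (x :: rest) (j + 1) = R rest j := by
  cases rest with
  | nil => simp [R, reachList]
  | cons y r => simp [R, reachList]

theorem reach_pos (recs : List Int) (j : Nat) : 1 ≤ R recs j := by
  induction recs generalizing j with
  | nil => simp [R, reachList]
  | cons x rest ih =>
    cases j with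
    | succ j => rw [reach_tail]; exact ih j
    | zero =>
      cases rest with
      | nil => simp [R, reachList]
      | cons y r =>
        have h0 : (reachList (y :: r)).headD 1 = R (y :: r) 0 := by
          cases r <;> rfl
        have h1 : (1 : Int) ≤ (reachList (y :: r)).getD 0 1 := ih 0
        simp only [R, reachList, List.getD_cons_zero, h0]
        split <;> omega

theorem reach_step (recs : List Int) (j : Nat) (h : j + 1 < recs.length)
    (hle : recs.getD j 0 ≤ recs.getD (j + 1) 0) :
    R recs j = R recs (j + 1) + 1 := by
  induction recs generalizing j with
  | nil => simp at h
  | cons x rest ih =>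
    cases j with
    | succ j =>
      rw [reach_tail, reach_tail]
      exact ih j (by simpa using h) (by simpa using hle)
    | zero =>
      cases rest with
      | nil => simp at h
      | cons y r =>
        have h0 : (reachList (y :: r)).headD 1 = R (y :: r) 0 := by
          cases r <;> rfl
        have hxy : x ≤ y := by simpa using hle
        rw [reach_tail]
        simp only [R, reachList, List.getD_cons_zero, h0]
        rw [if_pos hxy]

theorem reach_break (recs : List Int) (j : Nat) (h : j + 1 < recs.length)
    (hlt : recs.getD (j + 1) 0 < recs.getD j 0) :
    R recs j = 1 := by
  induction recs generalizing j with
  | nil => simp at h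
  | cons x rest ih =>
    cases j with
    | succ j =>
      rw [reach_tail]
      exact ih j (by simpa using h) (by simpa using hlt)
    | zero =>
      cases rest with
      | nil => simp at h
      | cons y r =>
        have h0 : (reachList (y :: r)).headD 1 = R (y :: r) 0 := by
          cases r <;> rfl
        have hxy : ¬ x ≤ y := by simp at hlt; omega
        simp only [R, reachList, List.getD_cons_zero, h0]
        rw [if_neg hxy]

theorem reach_last (recs : List Int) (j : Nat) (h : j + 1 = recs.length) :
    R recs j = 1 := by
  induction recs generalizing j with
  | nil => simp at h
  | cons x rest ih =>
    cases j with
    | succ j =>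
      rw [reach_tail]
      exact ih j (by simpa using h)
    | zero =>
      have : rest = [] := by
        cases rest with
        | nil => rfl
        | cons y r => simp at h
      subst this; rfl

theorem reach_ge (recs : List Int) (i j : Nat) (hj : j ≤ i) (hi : i < recs.length)
    (hruns : ∀ m : Nat, j < m → m ≤ i → recs.getD (m - 1) 0 ≤ recs.getD m 0) :
    ((i : Int) + 1 - (j : Int)) ≤ R recs j := by
  have H : ∀ d j, i - j = d → j ≤ i →
      (∀ m : Nat, j < m → m ≤ i → recs.getD (m - 1) 0 ≤ recs.getD m 0) →
      ((i : Int) + 1 - (j : Int)) ≤ R recs j := by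
    intro d
    induction d with
    | zero =>
      intro j hd hj _
      have : j = i := by omega
      subst this
      have := reach_pos recs j
      omega
    | succ d ih =>
      intro j hd hj hruns
      have hji : j < i := by omega
      have hstep : recs.getD j 0 ≤ recs.getD (j + 1) 0 := by
        have := hruns (j + 1) (by omega) (by omega)
        simpa using this
      rw [reach_step recs j (by omega) hstep]
      have := ih (j + 1) (by omega) (by omega)
        (fun m hm1 hm2 => hruns m (by omega) hm2)
      push_cast at this ⊢
      omega
  exact H (i - j) j rfl hj hruns

theorem reach_bound (recs : List Int) (j : Nat) (hj : j < recs.length) :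
    (j : Int) + R recs j ≤ recs.length := by
  have H : ∀ d j, recs.length - j = d → j < recs.length →
      (j : Int) + R recs j ≤ recs.length := by
    intro d
    induction d with
    | zero => intro j hd hj; omega
    | succ d ih =>
      intro j hd hj
      by_cases hlast : j + 1 = recs.length
      · rw [reach_last recs j hlast]; omega
      · have hj1 : j + 1 < recs.length := by omega
        by_cases hle : recs.getD j 0 ≤ recs.getD (j + 1) 0
        · rw [reach_step recs j hj1 hle]
          have := ih (j + 1) (by omega) hj1
          push_cast at this ⊢
          omega
        · rw [reach_break recs j hj1 (by omega)]; omega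
  exact H (recs.length - j) j rfl hj

theorem reach_run (recs : List Int) (j : Nat) (hj : j < recs.length) (m : Nat)
    (hm1 : j < m) (hm2 : (m : Int) < (j : Int) + R recs j) :
    recs.getD (m - 1) 0 ≤ recs.getD m 0 := by
  have H : ∀ d j, m - j = d → j < m → (m : Int) < (j : Int) + R recs j →
      j < recs.length → recs.getD (m - 1) 0 ≤ recs.getD m 0 := by
    intro d
    induction d with
    | zero => intro j hd hj _ _; omega
    | succ d ih =>
      intro j hd hj hm hjl
      have hR2 : 2 ≤ R recs j := by omega
      have hj1 : j + 1 < recs.length := by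
        have hb := reach_bound recs j hjl
        omega
      have hstep : recs.getD j 0 ≤ recs.getD (j + 1) 0 := by
        by_contra hc
        have := reach_break recs j hj1 (by omega)
        omega
      by_cases hmj : m = j + 1
      · subst hmj; simpa [Nat.add_sub_cancel] using hstep
      · have hRs := reach_step recs j hj1 hstep
        exact ih (j + 1) (by omega) (by omega) (by push_cast at hm ⊢; omega) hj1
  exact H (m - j) j rfl hm1 hm2 hj

-- ---- B's fold as a foldl max over a candidate list ----
def candsB (recs : List Int) : List Int :=
  ((List.range recs.length).filter
      (fun j => decide (j = 0 ∨ recs.getD (j - 1) 0 ≤ recs.getD j 0))).map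
    (fun j => R recs j * recs.getD j 0)

theorem fold_if_prop (l : List Nat) (P : Nat → Prop) [DecidablePred P] (v : Nat → Int) (b : Int) :
    l.foldl (fun acc j => if P j then max acc (v j) else acc) b
      = ((l.filter (fun j => decide (P j))).map v).foldl max b := by
  induction l generalizing b with
  | nil => rfl
  | cons x xs ih =>
    by_cases h : P x
    · simp only [List.foldl_cons, List.filter_cons, decide_eq_true h, if_pos h,
        List.foldl_cons]
      exact ih _
    · simp only [List.foldl_cons, List.filter_cons, decide_eq_false h, if_neg h,
        Bool.false_eq_true]
      exact ih _

theorem funcalt_eq (recs : List Int) :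
    func_alt recs = (candsB recs).foldl max (max ((recs.length : Int)) (bMax recs)) := by
  unfold func_alt candsB
  simp only []
  rw [fold_if_prop (List.range recs.length)
      (fun j => j = 0 ∨ recs.getD (j - 1) 0 ≤ recs.getD j 0)
      (fun j => (reachList recs).getD j 1 * recs.getD j 0)]
  rfl

theorem bMax_ge (recs : List Int) (k : Nat) (hk : k < recs.length) :
    recs.getD k 0 ≤ bMax recs := by
  cases recs with
  | nil => simp at hk
  | cons x xs =>
    cases k with
    | zero => simpa [bMax] using le_foldl_max xs x
    | succ k =>
      have hk' : k < xs.length := by simpa using hk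
      have hg : (x :: xs).getD (k + 1) 0 = xs[k] := by
        simp [List.getD, List.getElem?_eq_getElem hk']
      rw [hg]
      exact mem_le_foldl_max xs x _ (List.getElem_mem hk')

theorem seed_le_funcalt (recs : List Int) :
    max ((recs.length : Int)) (bMax recs) ≤ func_alt recs := by
  rw [funcalt_eq]; exact le_foldl_max _ _

theorem single_le_funcalt (recs : List Int) (k : Nat) (hk : k < recs.length) :
    recs.getD k 0 ≤ func_alt recs := by
  exact le_trans (bMax_ge recs k hk) (le_trans (le_max_right _ _) (seed_le_funcalt recs))

theorem cand_le_funcalt (recs : List Int) (j : Nat) (hj : j < recs.length)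
    (he : j = 0 ∨ recs.getD (j - 1) 0 ≤ recs.getD j 0) :
    R recs j * recs.getD j 0 ≤ func_alt recs := by
  rw [funcalt_eq]
  apply mem_le_foldl_max
  unfold candsB
  exact List.mem_map.mpr ⟨j, List.mem_filter.mpr ⟨List.mem_range.mpr hj, by simpa using he⟩, rfl⟩

-- ---- A-side bounds ----
theorem mono_aux (recs : List Int) : ∀ (fuel i : Nat) (t counts : Int),
    fuel = recs.length - i → t ≤ funcAux recs i t counts := by
  intro fuel
  induction fuel with
  | zero =>
    intro i t counts h
    rw [funcAux, dif_neg (by omega)]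
  | succ m ih =>
    intro i t counts h
    by_cases hi : i < recs.length
    · rw [funcAux, dif_pos hi]
      simp only []
      refine le_trans ?_ (ih (i + 1) _ _ (by omega))
      rw [pvMax_append_two]
      exact le_trans (le_max_right _ _) (le_foldl_max _ _)
    · rw [funcAux, dif_neg hi]

theorem mono_funcAux (recs : List Int) (i : Nat) (t counts : Int) :
    t ≤ funcAux recs i t counts :=
  mono_aux recs (recs.length - i) i t counts rfl

theorem single_le_funcAux (recs : List Int) (i k : Nat) (t counts : Int)
    (hik : i ≤ k) (hk : k < recs.length) :
    recs.getD k 0 ≤ funcAux recs i t counts := by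
  have H : ∀ (fuel i k : Nat) (t counts : Int), fuel = recs.length - i →
      i ≤ k → k < recs.length → recs.getD k 0 ≤ funcAux recs i t counts := by
    intro fuel
    induction fuel with
    | zero => intro i k t counts hf hik hkl; omega
    | succ m ih =>
      intro i k t counts hf hik hkl
      have hi : i < recs.length := by omega
      rw [funcAux, dif_pos hi]
      simp only []
      by_cases hike : i = k
      · subst hike
        refine le_trans ?_ (mono_funcAux recs (i + 1) _ _)
        rw [pvMax_append_two, pyGetD_int_eq recs (i : Int) i rfl]
        exact le_trans (le_max_left _ _) (le_foldl_max _ _)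
      · exact ih (i + 1) k _ _ (by omega) (by omega) hkl
  exact H (recs.length - i) i k t counts rfl hik hk

-- the candidate of an anchor j appears in A's scan at the end of j's run
theorem low_funcAux (recs : List Int) : ∀ (fuel i : Nat) (t counts : Int) (j : Nat),
    fuel = recs.length - i → 1 ≤ i → 0 ≤ counts →
    j < recs.length → (j = 0 ∨ recs.getD (j - 1) 0 ≤ recs.getD j 0) → 0 ≤ recs.getD j 0 →
    2 ≤ R recs j →
    (i ≤ j ∨ (j < i ∧ ((i : Int) - j) ≤ counts ∧ (i : Int) ≤ (j : Int) + R recs j - 1)) →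
    R recs j * recs.getD j 0 ≤ funcAux recs i t counts := by
  intro fuel
  induction fuel with
  | zero =>
    intro i t counts j hf h1 hc hj helig hv hR2 hdisj
    have hb := reach_bound recs j hj
    omega
  | succ m ih =>
    intro i t counts j hf h1 hc hj helig hv hR2 hdisj
    have hb := reach_bound recs j hj
    have hi : i < recs.length := by
      rcases hdisj with h | ⟨_, _, h⟩ <;> omega
    rw [funcAux, dif_pos hi]
    simp only []
    rw [pyGetD_int_eq recs ((i : Int) - 1) (i - 1) (by omega),
        pyGetD_int_eq recs (i : Int) i rfl]
    rcases hdisj with hle | ⟨hji, hcnt, hrun⟩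
    · rcases Nat.lt_or_ge i j with hlt | hge
      · by_cases hbr : recs.getD (i - 1) 0 ≤ recs.getD i 0
        · rw [if_pos hbr]
          exact ih (i + 1) _ _ j (by omega) (by omega) (by omega) hj helig hv hR2
            (Or.inl (by omega))
        · rw [if_neg hbr]
          exact ih (i + 1) _ _ j (by omega) (by omega) (by omega) hj helig hv hR2
            (Or.inl (by omega))
      · have hij : j = i := by omega
        subst hij
        have hbr : recs.getD (j - 1) 0 ≤ recs.getD j 0 := by
          rcases helig with h0 | hpair
          · omega
          · exact hpair
        rw [if_pos hbr]
        exact ih (j + 1) _ _ j (by omega) (by omega) (by omega) hj helig hv hR2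
          (Or.inr ⟨by omega, by omega, by omega⟩)
    · have hbr : recs.getD (i - 1) 0 ≤ recs.getD i 0 := by
        have := reach_run recs j hj i hji (by omega)
        simpa using this
      rw [if_pos hbr]
      by_cases hend : (i : Int) < (j : Int) + R recs j - 1
      · exact ih (i + 1) _ _ j (by omega) (by omega) (by omega) hj helig hv hR2
          (Or.inr ⟨by omega, by omega, by omega⟩)
      · refine le_trans ?_ (mono_funcAux recs (i + 1) _ _)
        rw [pvMax_append_two]
        apply mem_le_foldl_max
        apply List.mem_map.mpr
        refine ⟨R recs j, ?_, ?_⟩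
        · rw [PySem.List.mem_pyRange_one]; omega
        · rw [pyGetD_int_eq recs ((i : Int) + 1 - R recs j) j (by omega)]

-- A never exceeds B
theorem up_funcAux (recs : List Int) : ∀ (fuel i : Nat) (t counts : Int),
    fuel = recs.length - i → 1 ≤ i →
    t ≤ func_alt recs → 0 ≤ counts → counts ≤ (i : Int) →
    (∀ m : Nat, 1 ≤ m → m ≤ i - 1 → (i : Int) - counts ≤ (m : Int) →
      recs.getD (m - 1) 0 ≤ recs.getD m 0) →
    funcAux recs i t counts ≤ func_alt recs := by
  intro fuel
  induction fuel with
  | zero =>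
    intro i t counts hf h1 ht hc0 hci hw
    rw [funcAux, dif_neg (by omega)]
    exact ht
  | succ m ih =>
    intro i t counts hf h1 ht hc0 hci hw
    by_cases hi : i < recs.length
    · rw [funcAux, dif_pos hi]
      simp only []
      rw [pyGetD_int_eq recs ((i : Int) - 1) (i - 1) (by omega),
          pyGetD_int_eq recs (i : Int) i rfl]
      by_cases hbr : recs.getD (i - 1) 0 ≤ recs.getD i 0
      · rw [if_pos hbr]
        have hw' : ∀ m : Nat, 1 ≤ m → m ≤ i → ((i : Int) + 1) - (counts + 1) ≤ (m : Int) →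
            recs.getD (m - 1) 0 ≤ recs.getD m 0 := by
          intro mm hm1 hm2 hm3
          rcases Nat.lt_or_ge mm i with h | h
          · exact hw mm hm1 (by omega) (by omega)
          · have : mm = i := by omega
            subst this; exact hbr
        refine ih (i + 1) _ _ (by omega) (by omega) ?_ (by omega) (by omega) ?_
        · rw [pvMax_append_two]
          apply foldl_max_le
          · exact max_le (single_le_funcalt recs i hi) ht
          · intro x hx
            rcases List.mem_map.mp hx with ⟨c, hcmem, rfl⟩
            rw [PySem.List.mem_pyRange_one] at hcmem
            set jn : Nat := i + 1 - c.toNat with hjdef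
            have hcj : (i : Int) + 1 - c = (jn : Int) := by omega
            rw [pyGetD_int_eq recs _ jn hcj]
            have hjlt : jn < recs.length := by omega
            by_cases hv : 0 ≤ recs.getD jn 0
            · have hruns : ∀ mm : Nat, jn < mm → mm ≤ i →
                  recs.getD (mm - 1) 0 ≤ recs.getD mm 0 :=
                fun mm hm1 hm2 => hw' mm (by omega) hm2 (by omega)
              have hcR : c ≤ R recs jn := by
                have := reach_ge recs i jn (by omega) hi hruns
                omega
              have helig : jn = 0 ∨ recs.getD (jn - 1) 0 ≤ recs.getD jn 0 := by
                rcases Nat.eq_zero_or_pos jn with h0 | hpos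
                · exact Or.inl h0
                · exact Or.inr (hw' jn (by omega) (by omega) (by omega))
              calc c * recs.getD jn 0 ≤ R recs jn * recs.getD jn 0 :=
                    mul_le_mul_of_nonneg_right hcR hv
                _ ≤ func_alt recs := cand_le_funcalt recs jn hjlt helig
            · have h1c : c * recs.getD jn 0 ≤ 1 * recs.getD jn 0 :=
                mul_le_mul_of_nonpos_right (by omega) (by omega)
              rw [one_mul] at h1c
              exact le_trans h1c (single_le_funcalt recs jn hjlt)
        · intro mm hm1 hm2 hm3
          exact hw' mm hm1 (by omega) (by omega)
      · rw [if_neg hbr]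
        refine ih (i + 1) _ _ (by omega) (by omega) ?_ (by omega) (by omega) ?_
        · have hre : PySem.List.pyRange 1 ((0 : Int) + 1) 1 = [] :=
            PySem.List.pyRange_one_eq_nil (by omega)
          rw [hre, List.map_nil, pvMax_append_two, List.foldl_nil]
          exact max_le (single_le_funcalt recs i hi) ht
        · intro mm hm1 hm2 hm3
          omega
    · rw [funcAux, dif_neg hi]
      exact ht

theorem bMax_le (recs : List Int) (hne : recs ≠ []) (C : Int)
    (h : ∀ k, k < recs.length → recs.getD k 0 ≤ C) : bMax recs ≤ C := by
  cases recs with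
  | nil => exact absurd rfl hne
  | cons x xs =>
    apply foldl_max_le xs x C
    · simpa using h 0 (by simp)
    · intro y hy
      obtain ⟨k, hk, rfl⟩ := List.mem_iff_getElem.mp hy
      have := h (k + 1) (by simpa using hk)
      simpa [List.getD, List.getElem?_eq_getElem hk] using this

theorem single_le_func (recs : List Int) (k : Nat) (hk : k < recs.length) :
    recs.getD k 0 ≤ funcAux recs 1 (max ((recs.length : Int) * 1) (recs.getD 0 0)) 1 := by
  cases k with
  | zero => exact le_trans (le_max_right _ _) (mono_funcAux recs 1 _ 1)
  | succ k => exact single_le_funcAux recs 1 (k + 1) _ _ (by omega) hk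

-- ===== VERDICT (by name: the statement is the Claim_ definition above) =====
theorem func_spec : Claim_equal_func := by
  intro recs _hdom hpre
  unfold Spec_func func
  have hn : 1 ≤ recs.length := List.length_pos_of_ne_nil hpre
  rw [pyGetD_int_eq recs 0 0 rfl]
  apply le_antisymm
  · -- A ≤ B
    refine up_funcAux recs (recs.length - 1) 1 _ 1 rfl le_rfl ?_ (by omega) (by omega) ?_
    · apply max_le
      · exact le_trans (le_of_eq (mul_one _))
          (le_trans (le_max_left _ (bMax recs)) (seed_le_funcalt recs))
      · exact single_le_funcalt recs 0 (by omega)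
    · intro m hm1 hm2 _
      omega
  · -- B ≤ A
    rw [funcalt_eq]
    apply foldl_max_le
    · apply max_le
      · exact le_trans (le_trans (le_of_eq (mul_one _).symm) (le_max_left _ _))
          (mono_funcAux recs 1 _ 1)
      · exact bMax_le recs hpre _ (fun k hk => single_le_func recs k hk)
    · intro x hx
      obtain ⟨j, hjf, rfl⟩ := List.mem_map.mp hx
      have hjmem := List.mem_filter.mp hjf
      have hj : j < recs.length := List.mem_range.mp hjmem.1
      have helig : j = 0 ∨ recs.getD (j - 1) 0 ≤ recs.getD j 0 := by
        simpa using hjmem.2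
      by_cases hv : 0 ≤ recs.getD j 0
      · by_cases hR1 : R recs j = 1
        · rw [hR1, one_mul]
          exact single_le_func recs j hj
        · have hR2 : 2 ≤ R recs j := by
            have := reach_pos recs j
            omega
          rcases Nat.eq_zero_or_pos j with h0 | hpos
          · subst h0
            exact low_funcAux recs (recs.length - 1) 1 _ 1 0 rfl le_rfl (by omega) hj
              helig hv hR2 (Or.inr ⟨by omega, by omega, by omega⟩)
          · exact low_funcAux recs (recs.length - 1) 1 _ 1 j rfl le_rfl (by omega) hj
              helig hv hR2 (Or.inl (by omega))
      · have h1c : R recs j * recs.getD j 0 ≤ 1 * recs.getD j 0 :=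
          mul_le_mul_of_nonpos_right (reach_pos recs j) (by omega)
        rw [one_mul] at h1c
        exact le_trans h1c (single_le_func recs j hj)
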